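-- pv_equiv track=rewrite | github.com/fdibaldassarre/advent-of-code-2019 | 17/compute.py | get_first_gap
-- ===== SOURCE A (Python) =====
-- def get_first_gap(moves, filled):
--     gap = []
--     gap_started = False
--     for i, is_filled in enumerate(filled):
--         if gap_started:
--             if is_filled:
--                 break
--             else:
--                 gap.append(moves[i])
--         elif not is_filled:
--             gap_started = True
--             gap.append(moves[i])
--     return gap
-- ===== SOURCE B (Python) =====
-- def get_first_gap(moves, filled):
--     start = next((i for i, f in enumerate(filled) if not f), None)
--     if start is None:
--         return []
--     end = next((j for j in range(start, len(filled)) if filled[j]), len(filled))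
--     return [moves[k] for k in range(start, end)]
-- ===== Notes on version B (the rewrite author's own statement) =====
-- stated objective: idiomatic
-- what changed: The flag-driven accumulate-and-break loop is replaced by explicit boundary finding (first unfilled index, then first filled index after it) followed by a comprehension over that index range.
import Mathlib
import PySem

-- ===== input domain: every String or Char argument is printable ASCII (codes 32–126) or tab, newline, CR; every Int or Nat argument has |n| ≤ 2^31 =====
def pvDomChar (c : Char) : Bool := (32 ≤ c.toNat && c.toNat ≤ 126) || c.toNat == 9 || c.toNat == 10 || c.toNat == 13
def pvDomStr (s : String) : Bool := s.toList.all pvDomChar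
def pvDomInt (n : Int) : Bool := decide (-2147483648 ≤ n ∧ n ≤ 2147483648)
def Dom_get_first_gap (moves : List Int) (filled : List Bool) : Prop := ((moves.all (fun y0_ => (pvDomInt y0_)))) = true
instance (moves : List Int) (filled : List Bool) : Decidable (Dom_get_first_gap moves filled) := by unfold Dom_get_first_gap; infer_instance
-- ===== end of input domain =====

-- B replaces A's flag-driven accumulate-and-break loop by explicit boundary finding
-- (first unfilled index, first filled index after it) followed by a comprehension
-- over that index range (objective: idiomatic).

-- ===== PORT A =====
-- literal transliteration of A's for-loop with its `gap`/`gap_started` state and break;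
-- moves[i] is in range on every input Pre_ admits, so `.getD 0` is never taken there
def getFirstGapLoop (moves : List Int) : Nat → List Bool → List Int → Bool → List Int
  | _, [], gap, _ => gap
  | i, f :: rest, gap, started =>
    if started then
      if f then gap
      else getFirstGapLoop moves (i+1) rest (gap ++ [(PySem.List.pyGet? moves (Int.ofNat i)).getD 0]) started
    else if !f then
      getFirstGapLoop moves (i+1) rest (gap ++ [(PySem.List.pyGet? moves (Int.ofNat i)).getD 0]) true
    else
      getFirstGapLoop moves (i+1) rest gap started

def get_first_gap (moves : List Int) (filled : List Bool) : List Int :=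
  getFirstGapLoop moves 0 filled [] false

-- ===== PORT B =====
-- transliteration of Source B: `start` = first index with ¬filled (None → []), `end` = first
-- filled index ≥ start (default len(filled)), then the comprehension over range(start, end)
def get_first_gap_alt (moves : List Int) (filled : List Bool) : List Int :=
  if false ∈ filled then
    let s := filled.idxOf false
    let e := s + (filled.drop s).idxOf true
    (List.range' s (e - s)).map (fun k => (PySem.List.pyGet? moves (Int.ofNat k)).getD 0)
  else []

-- ===== PRECONDITION & SPEC =====
-- Pre_ excludes exactly the inputs on which A raises IndexError: those where the first
-- gap of `filled` reaches an index ≥ len(moves); B raises there too.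
def Pre_get_first_gap (moves : List Int) (filled : List Bool) : Prop :=
  false ∈ filled →
    filled.idxOf false + (filled.drop (filled.idxOf false)).idxOf true ≤ moves.length
instance (moves : List Int) (filled : List Bool) : Decidable (Pre_get_first_gap moves filled) := by
  unfold Pre_get_first_gap; infer_instance
def pvWitness_get_first_gap : List Int × List Bool := ([1, 2, 3], [true, false, true])

def Spec_get_first_gap (moves : List Int) (filled : List Bool) (out : List Int) : Prop := out = get_first_gap_alt moves filled
instance (moves : List Int) (filled : List Bool) (out : List Int) : Decidable (Spec_get_first_gap moves filled out) := by unfold Spec_get_first_gap; infer_instance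

-- ===== CLAIM (what is proved, stated in full; the proofs are below) =====
def Claim_equal_get_first_gap : Prop := ∀ (moves : List Int) (filled : List Bool), Dom_get_first_gap moves filled → Pre_get_first_gap moves filled → Spec_get_first_gap moves filled (get_first_gap moves filled)

-- ===== LEMMAS AND PROOFS =====

-- once started, A collects moves[i] for consecutive indices until the first `true`
theorem loop_started (moves : List Int) :
    ∀ (rest : List Bool) (i : Nat) (gap : List Int),
      getFirstGapLoop moves i rest gap true =
        gap ++ (List.range' i (rest.idxOf true)).map
          (fun k => (PySem.List.pyGet? moves (Int.ofNat k)).getD 0) := by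
  intro rest
  induction rest with
  | nil => intro i gap; simp [getFirstGapLoop]
  | cons f rs ih =>
    intro i gap
    cases f with
    | true => simp [getFirstGapLoop]
    | false =>
      simp only [getFirstGapLoop, List.idxOf_cons]
      rw [ih]
      simp [List.range'_succ]

-- before starting, A skips leading `true`s; the whole run equals the map over the gap range
theorem loop_unstarted (moves : List Int) :
    ∀ (rest : List Bool) (i : Nat) (gap : List Int),
      getFirstGapLoop moves i rest gap false =
        gap ++ (List.range' (i + rest.idxOf false)
            ((rest.drop (rest.idxOf false)).idxOf true)).map
          (fun k => (PySem.List.pyGet? moves (Int.ofNat k)).getD 0) := by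
  intro rest
  induction rest with
  | nil => intro i gap; simp [getFirstGapLoop]
  | cons f rs ih =>
    intro i gap
    cases f with
    | true =>
      have hstep : getFirstGapLoop moves i (true :: rs) gap false
          = getFirstGapLoop moves (i+1) rs gap false := by simp [getFirstGapLoop]
      have h1 : (true :: rs).idxOf false = rs.idxOf false + 1 := by simp
      have harith : i + (rs.idxOf false + 1) = i + 1 + rs.idxOf false := by omega
      rw [hstep, ih, h1, harith]
      simp
    | false =>
      simp only [getFirstGapLoop, List.idxOf_cons]
      rw [loop_started]
      simp [List.range'_succ]

-- ===== VERDICT (by name: the statement is the Claim_ definition above) =====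
theorem get_first_gap_spec : Claim_equal_get_first_gap := by
  intro moves filled _ _
  unfold Spec_get_first_gap get_first_gap get_first_gap_alt
  rw [loop_unstarted]
  by_cases h : false ∈ filled
  · simp [h]
  · have hlen : filled.idxOf false = filled.length := List.idxOf_eq_length_iff.mpr h
    simp [h]
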